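-- pv_equiv track=rewrite | github.com/gurujbc/footbag-platform | legacy_data/pipeline/identity/build_name_variants.py | normalize_case
-- ===== SOURCE A (Python) =====
-- def normalize_case(s: str) -> str:
--     """Title-case only when the input is entirely upper or entirely lower.
--     Preserves mixed case (O'Brien, McCarthy, de la Cruz) as-is."""
--     letters = [c for c in s if c.isalpha()]
--     if not letters:
--         return s
--     if all(c.isupper() for c in letters) or all(c.islower() for c in letters):
--         out = []
--         prev_alpha = False
--         for c in s:
--             if c.isalpha():
--                 out.append(c.upper() if not prev_alpha else c.lower())
--                 prev_alpha = True
--             else: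
--                 out.append(c)
--                 prev_alpha = False
--         return "".join(out)
--     return s
-- ===== SOURCE B (Python) =====
-- def normalize_case(s: str) -> str:
--     """Title-case only when the input is entirely upper or entirely lower.
--     Preserves mixed case (O'Brien, McCarthy, de la Cruz) as-is."""
--     letters = [c for c in s if c.isalpha()]
--     if not letters:
--         return s
--     if all(c.isupper() for c in letters) or all(c.islower() for c in letters):
--         pieces = []
--         i, n = 0, len(s)
--         while i < n:
--             alpha = s[i].isalpha()
--             j = i + 1
--             while j < n and s[j].isalpha() == alpha:
--                 j += 1
--             run = s[i:j]
--             pieces.append(run[0].upper() + run[1:].lower() if alpha else run)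
--             i = j
--         return "".join(pieces)
--     return s
-- ===== Notes on version B (the rewrite author's own statement) =====
-- stated objective: alternative
-- what changed: Replaced the per-character prev_alpha boolean state machine with a run-based pass: scan out maximal alphabetic/non-alphabetic runs and title-case each alpha run as run[0].upper()+run[1:].lower(), emitting non-alpha runs unchanged.
import Mathlib
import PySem

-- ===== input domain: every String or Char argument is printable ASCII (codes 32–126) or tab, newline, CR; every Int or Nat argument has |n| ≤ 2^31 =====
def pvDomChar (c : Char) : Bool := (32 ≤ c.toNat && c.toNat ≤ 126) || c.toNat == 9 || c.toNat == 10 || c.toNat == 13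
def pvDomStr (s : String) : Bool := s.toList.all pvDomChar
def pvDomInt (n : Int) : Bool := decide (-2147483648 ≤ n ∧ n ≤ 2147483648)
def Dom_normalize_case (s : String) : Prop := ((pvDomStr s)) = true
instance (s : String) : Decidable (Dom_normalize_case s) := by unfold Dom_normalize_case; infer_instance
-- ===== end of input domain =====

-- B replaces A's per-character prev_alpha state machine with a run-based pass (same O(n) cost).

-- ===== PORT A =====
def normalize_case (s : String) : String :=
  let letters := s.toList.filter PySem.Chars.isalpha
  if letters.isEmpty then s
  else if letters.all PySem.Chars.isupper || letters.all PySem.Chars.islower then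
    let st := s.toList.foldl (fun (st : List Char × Bool) c =>
      if PySem.Chars.isalpha c then
        (st.1 ++ [if !st.2 then PySem.Chars.upperChar c else PySem.Chars.lowerChar c], true)
      else (st.1 ++ [c], false)) ([], false)
    String.mk st.1
  else s

-- ===== PORT B =====
-- run-splitting loop of Source B: peel off one maximal run (same isalpha value) at a time
def pvRunsB : List Char → List Char
  | [] => []
  | c :: cs =>
    if PySem.Chars.isalpha c then
      PySem.Chars.upperChar c :: (cs.takeWhile PySem.Chars.isalpha).map PySem.Chars.lowerChar
        ++ pvRunsB (cs.dropWhile PySem.Chars.isalpha)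
    else
      c :: cs.takeWhile (fun d => !PySem.Chars.isalpha d)
        ++ pvRunsB (cs.dropWhile (fun d => !PySem.Chars.isalpha d))
termination_by cs => cs.length
decreasing_by
  · exact Nat.lt_succ_of_le (List.length_dropWhile_le _ cs)
  · exact Nat.lt_succ_of_le (List.length_dropWhile_le _ cs)

def normalize_case_alt (s : String) : String :=
  let letters := s.toList.filter PySem.Chars.isalpha
  if letters.isEmpty then s
  else if letters.all PySem.Chars.isupper || letters.all PySem.Chars.islower then
    String.mk (pvRunsB s.toList)
  else s

-- ===== PRECONDITION & SPEC =====
def Spec_normalize_case (s : String) (out : String) : Prop := out = normalize_case_alt s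
instance (s : String) (out : String) : Decidable (Spec_normalize_case s out) := by unfold Spec_normalize_case; infer_instance

-- ===== CLAIM (what is proved, stated in full; the proofs are below) =====
def Claim_equal_normalize_case : Prop := ∀ (s : String), Dom_normalize_case s → Spec_normalize_case s (normalize_case s)

-- ===== LEMMAS AND PROOFS =====

-- recursive characterisation of A's fold body
def pvGA : Bool → List Char → List Char
  | _, [] => []
  | prev, c :: cs =>
    if PySem.Chars.isalpha c then
      (if !prev then PySem.Chars.upperChar c else PySem.Chars.lowerChar c) :: pvGA true cs
    else c :: pvGA false cs

theorem pvGA_foldl (cs : List Char) (out : List Char) (prev : Bool) :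
    (cs.foldl (fun (st : List Char × Bool) c =>
      if PySem.Chars.isalpha c then
        (st.1 ++ [if !st.2 then PySem.Chars.upperChar c else PySem.Chars.lowerChar c], true)
      else (st.1 ++ [c], false)) (out, prev)).1 = out ++ pvGA prev cs := by
  induction cs generalizing out prev with
  | nil => simp [pvGA]
  | cons c cs ih =>
    simp only [List.foldl_cons]
    by_cases h : PySem.Chars.isalpha c = true
    · rw [if_pos h, ih]
      simp [pvGA, h]
    · rw [if_neg h, ih]
      simp [pvGA, h]

theorem pvGA_true (cs : List Char) :
    pvGA true cs = (cs.takeWhile PySem.Chars.isalpha).map PySem.Chars.lowerChar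
      ++ pvGA false (cs.dropWhile PySem.Chars.isalpha) := by
  induction cs with
  | nil => simp [pvGA]
  | cons c cs ih =>
    by_cases h : PySem.Chars.isalpha c = true <;>
      simp [pvGA, h, ih, List.takeWhile_cons, List.dropWhile_cons]

theorem pvGA_false_nonalpha (cs : List Char) :
    pvGA false cs = cs.takeWhile (fun d => !PySem.Chars.isalpha d)
      ++ pvGA false (cs.dropWhile (fun d => !PySem.Chars.isalpha d)) := by
  induction cs with
  | nil => simp [pvGA]
  | cons c cs ih =>
    by_cases h : PySem.Chars.isalpha c = true
    · simp [pvGA, h, List.takeWhile_cons, List.dropWhile_cons]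
    · simp only [pvGA, h, List.takeWhile_cons, List.dropWhile_cons, Bool.not_eq_true, if_false,
        Bool.not_false, if_true, List.cons_append, Bool.not_true]
      simp [h, ih]

theorem pvRunsB_eq_pvGA (cs : List Char) : pvRunsB cs = pvGA false cs := by
  induction cs using pvRunsB.induct with
  | case1 => simp [pvRunsB, pvGA]
  | case2 c cs h ih =>
    rw [pvRunsB, pvGA]
    simp [h, pvGA_true, ih]
  | case3 c cs h ih =>
    rw [pvRunsB, pvGA, pvGA_false_nonalpha cs]
    simp [h, ih]

-- ===== VERDICT (by name: the statement is the Claim_ definition above) =====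
theorem normalize_case_spec : Claim_equal_normalize_case := by
  intro s _
  unfold Spec_normalize_case normalize_case normalize_case_alt
  simp only [pvGA_foldl, List.nil_append, pvRunsB_eq_pvGA]
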